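/- GENERATED by mk_final_copies.py from the proof of the farm's unit `vorbis_decode_packet_rest.4a` (farm:vorbis_decode_packet_rest.4a.1: Lemmas.lean) as the
   re-elaboration sweep compiled it — do not edit. -/
import Asan.CheckWalk
import Vorbis.Spec.Units.vorbis_decode_packet_rest_4a

open X86 X86.User Asan Vorbis Vorbis.Spec Vorbis.Spec.vorbis_decode_packet_rest

set_option maxRecDepth 4000
set_option maxHeartbeats 4000000

namespace Vorbis.Spec.vorbis_decode_packet_rest_4a

/-- The low half of a small number in a register is the number. -/
theorem part32_ofNat (k : Nat) (hk : k < 2 ^ 32) : Word.part .w32 (UInt64.ofNat k) = BitVec.ofNat 32 k := by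
  apply BitVec.eq_of_toNat_eq
  rw [part32_toNat, UInt64.toNat_ofNat', BitVec.toNat_ofNat]
  have e1 : k % 2 ^ 64 = k := Nat.mod_eq_of_lt (by omega)
  rw [e1]

/-! ### The spill slots at the walker's normal form (`bv_decide` over one word variable: never inside a walk context) -/

/-- The slot `[rsp + 0x8]` of the steady frame, `rsp = entry rsp − 3000`, as the walker spells it. -/
theorem slot_a8 (r : Word) : r - 3000 + 0x8 = r - 2992 := by
  bv_decide

/-- The slot `[rsp + 0x10]` of the steady frame, `rsp = entry rsp − 3000`, as the walker spells it. -/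
theorem slot_a10 (r : Word) : r - 3000 + 0x10 = r - 2984 := by
  bv_decide

/-- The slot `[rsp + 0x18]` of the steady frame, `rsp = entry rsp − 3000`, as the walker spells it. -/
theorem slot_a18 (r : Word) : r - 3000 + 0x18 = r - 2976 := by
  bv_decide

/-- The slot `[rsp + 0x20]` of the steady frame, `rsp = entry rsp − 3000`, as the walker spells it. -/
theorem slot_a20 (r : Word) : r - 3000 + 0x20 = r - 2968 := by
  bv_decide

/-- The slot `[rsp + 0x30]` of the steady frame, `rsp = entry rsp − 3000`, as the walker spells it. -/
theorem slot_a30 (r : Word) : r - 3000 + 0x30 = r - 2952 := by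
  bv_decide

/-- The slot `[rsp + 0x38]` of the steady frame, `rsp = entry rsp − 3000`, as the walker spells it. -/
theorem slot_a38 (r : Word) : r - 3000 + 0x38 = r - 2944 := by
  bv_decide

/-- The slot `[rsp + 0x48]` of the steady frame, `rsp = entry rsp − 3000`, as the walker spells it. -/
theorem slot_a48 (r : Word) : r - 3000 + 0x48 = r - 2928 := by
  bv_decide

/-- **The exit arm of sub-segment A**: 0x110d0a–0x110d11 + 0x110e74–0x110e79 with `k = cdim`: `r15 = g`,
`++j` → the entry assertion `At3 … (j + 1)` of segment .3 (`Loop4.exit_at3`). The other arm is refuted by `k = cdim`. -/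
theorem segA_exit {Lay : Layout} (hLay : Lay.hi = 0x1000000) {μ : Microarch} (hμ : UserX.MicroOK μ) {u₀ : State}
    (hcode : HasCodeNat Lay u₀ Vorbis.L.vorbis_decode_packet_rest.entry Vorbis.Code.code_vorbis_decode_packet_rest.nat Vorbis.L.vorbis_decode_packet_rest.size)
    (others : List Obj) (frames : List (Nat × FrameLayout)) (len : Nat) (Ar : Arena) (stored room : Int)
    (mode : Nat) (ysz : Nat → Nat) (e : State) (ret : Word) (i j k : Nat) (v : State)
    (hat : At4K u₀ others frames len Ar stored room mode ysz e ret i j k v)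
    (hk : k = slot32 e v 0x10) :
    ReachVia Lay μ Vorbis.WayInv v (fun w => At3 u₀ others frames len Ar stored room mode ysz e ret i (j + 1) w) := by
  have he := hat.entry
  v_entry he
  have w_rip := hat.rip
  have w_rsp : v.reg .rsp = e.reg .rsp - 3000 := hat.rsp
  have hrsp_v : v.reg .rsp = e.reg .rsp - 3000 := hat.rsp
  have w_eq : Mem.EqOn Vorbis.L.textLo Vorbis.L.textHi u₀.mem v.mem := hat.code
  have hdf : v.flags .df = false := (show abiInv _ from hat.abi).1
  have hmx : v.mxcsr &&& 0x1F80 = 0x1F80 := (show abiInv _ from hat.abi).2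
  have hsse := Vorbis.sseOK_of_abiInv hat.abi
  have hr14 : v.reg .r14 = UInt64.ofNat k := hat.r14
  have hcd8 := hat.toLoop4.cdim_le
  have a10 : e.reg .rsp - 3000 + 0x10 = e.reg .rsp - 2984 := slot_a10 _
  have a18 : e.reg .rsp - 3000 + 0x18 = e.reg .rsp - 2976 := slot_a18 _
  have a48 : e.reg .rsp - 3000 + 0x48 = e.reg .rsp - 2928 := slot_a48 _
  have hcdim : v.mem.readLE (e.reg .rsp - 2984) 4 = k := by
    rw [← a10, hk]
  obtain ⟨g, hg⟩ : ∃ g : Nat, slot64 e v 0x18 = g := ⟨_, rfl⟩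
  have hgs : v.mem.readLE (e.reg .rsp - 2976) 8 = g := by
    rw [← a18]
    exact hg
  have hjs : v.mem.readLE (e.reg .rsp - 2928) 4 = j := by
    rw [← a48]
    exact hat.slot_j
  u_walk hcode [hμ.vendor] until [Vorbis.L.vorbis_decode_packet_rest.cut8] span [Vorbis.L.textLo, Vorbis.L.textHi] side (v_side)
  · -- `k ≥ cdim`: `++j`, the head of the partition loop
    refine ReachVia.done ?_
    have hsame : Mem.SameExcept [⟨(e.reg .rsp).toNat - 3000 + 0x48, (e.reg .rsp).toNat - 3000 + 0x4c⟩] v.mem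
        s_110e79.mem := by
      u_same
    have hj256 : j < 256 := by
      have h1 := Floor1.partitions_lt v.mem (slot64 e v 0x18)
      have h2 := hat.j_lt
      omega
    apply Loop4.exit_at3 hat.toLoop4 he_room he_top hk w_rip ((w_kept .rsp rfl).trans hat.rsp) w_eq ?_ ?_ ?_ hsame ?_
    · show (Vorbis.conv u₀).inv _
      v_inv
    · rw [w_kept .rbp rfl]
      exact hat.rbp
    · rw [w_r15, hg, UInt64.toNat_ofNat']
      apply Nat.mod_eq_of_lt
      rw [← hg]
      exact Mem.readLE_lt' _ _ 8
    · show s_110e79.mem.readLE (e.reg .rsp - 3000 + 0x48) 4 = j + 1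
      rw [a48, w_mem, Mem.readLE_writeLE_same _ _ _ _ (by omega)]
      have e1 : (1#32).toNat = 1 := rfl
      rw [BitVec.toNat_add, BitVec.toNat_ofNat, e1]
      omega
  · -- `k < cdim` contradicts `k = cdim`
    exfalso
    apply hbr_110d11
    rw [part32_ofNat k (by omega)]
    exact Int.le_refl _


/-! ### The bit-level facts of the two body arms of .4a (used by `segA_body` below) -/


/-- `and eax, esi ; cdqe ; movsxd rdx, [pclass] ; lea rbx, [rax + rdx*8 + 0x28] ; lea rdi, [r13 + rbx*2 + 2]`: the address of
`g->subclass_books[pclass][cval & csub]`, for a masked index and a class number below `2^31`. -/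
theorem sb_addr (g cv cs pc : Nat) (hidx : (cv % 2 ^ 32) &&& (cs % 2 ^ 32) < 8) (hpc : pc < 16)
    (hg : g + 400 < 2 ^ 64) :
    (UInt64.ofNat g + (Word.ofBV (BitVec.signExtend 64 (BitVec.ofNat 32 cv &&& BitVec.ofNat 32 cs)) +
      Word.ofBV (BitVec.signExtend 64 (BitVec.ofNat 32 pc)) * 8 + 40) * 2 + 2).toNat
      = g + 82 + 2 * (8 * pc + ((cv % 2 ^ 32) &&& (cs % 2 ^ 32))) := by
  have e1 : (BitVec.ofNat 32 cv &&& BitVec.ofNat 32 cs).toNat = (cv % 2 ^ 32) &&& (cs % 2 ^ 32) := by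
    rw [BitVec.toNat_and, BitVec.toNat_ofNat, BitVec.toNat_ofNat]
  have e2 := toNat_sext32 (BitVec.ofNat 32 cv &&& BitVec.ofNat 32 cs) (by rw [e1]; omega)
  have e3 : (BitVec.ofNat 32 pc).toNat = pc := toNat_ofNat32 pc (by omega)
  have e4 := toNat_sext32 (BitVec.ofNat 32 pc) (by rw [e3]; omega)
  have c8 : (8 : Word).toNat = 8 := rfl
  have c40 : (40 : Word).toNat = 40 := rfl
  have c2 : (2 : Word).toNat = 2 := rfl
  generalize (cv % 2 ^ 32) &&& (cs % 2 ^ 32) = idx at *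
  rw [UInt64.toNat_add, UInt64.toNat_add, UInt64.toNat_mul, UInt64.toNat_add, UInt64.toNat_add, UInt64.toNat_mul,
    e2, e1, e4, e3, c8, c40, c2, UInt64.toNat_ofNat']
  omega



/-- `test bx, 0x8000` is zero: bit 15 of the loaded `uint16` is clear. -/
theorem bit15_clear (x : BitVec 16) (h : (BitVec.setWidth 16 (BitVec.zeroExtend 32 x) &&& 32768#16).toNat = 0) :
    x.toNat < 32768 := by
  have h0 : (BitVec.setWidth 16 (BitVec.zeroExtend 32 x) &&& 32768#16) = 0#16 := BitVec.eq_of_toNat_eq h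
  have h1 : x < 32768#16 := by
    bv_decide
  exact BitVec.lt_def.mp h1

/-- `movzx ebx, word`: the zero-extended `uint16` in the register. -/
theorem zext16_reg (b : Nat) (hb : b < 65536) : Word.ofBV (BitVec.zeroExtend 32 (BitVec.ofNat 16 b)) = UInt64.ofNat b := by
  apply UInt64.toNat_inj.mp
  rw [toNat_ofBV32, UInt64.toNat_ofNat']
  simp only [BitVec.toNat_setWidth, BitVec.truncate_eq_setWidth, BitVec.toNat_ofNat]
  omega



/-- A small number as a signed 32-bit value. -/
theorem ofNat32_toInt_small (n : Nat) (h : n < 2 ^ 31) : (BitVec.ofNat 32 n).toInt = n := by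
  rw [BitVec.toInt_eq_toNat_cond, toNat_ofNat32 n (by omega)]
  have h2 : 2 * n < 2 ^ 32 := by omega
  rw [if_pos h2]

/-- The address of `g->subclass_books[pclass][idx]` as a word equation, for the walker's facts list (`sb_addr`). -/
theorem sb_addr_w (g cv cs pc : Nat) (hidx : (cv % 2 ^ 32) &&& (cs % 2 ^ 32) < 8) (hpc : pc < 16)
    (hg : g + 400 < 2 ^ 64) :
    UInt64.ofNat g + (Word.ofBV (BitVec.signExtend 64 (BitVec.ofNat 32 cv &&& BitVec.ofNat 32 cs)) +
      Word.ofBV (BitVec.signExtend 64 (BitVec.ofNat 32 pc)) * 8 + 40) * 2 + 2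
      = addr (g + 82 + 2 * (8 * pc + ((cv % 2 ^ 32) &&& (cs % 2 ^ 32)))) :=
  eq_addr _ _ (sb_addr g cv cs pc hidx hpc hg)

/-- `cdqe ; lea r12, [rsi + rax*2]` with `eax = offset < 2^31`: the address of `finalY[offset]`, as a word equation. -/
theorem y_addr_w (y off : Nat) (ho : off < 2 ^ 31) (hy : y + 2 * off < 2 ^ 64) :
    UInt64.ofNat y + Word.ofBV (BitVec.signExtend 64 (BitVec.ofNat 32 off)) * 2 = addr (y + 2 * off) := by
  apply eq_addr
  have e1 : (BitVec.ofNat 32 off).toNat = off := toNat_ofNat32 off (by omega)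
  have e2 := toNat_sext32 (BitVec.ofNat 32 off) (by omega)
  have e3 : (2 : Word).toNat = 2 := rfl
  rw [UInt64.toNat_add, UInt64.toNat_mul, e2, e1, e3, UInt64.toNat_ofNat']
  omega

/-- `lea ebx, [rax + 1]` with `eax = offset`: `offset + 1`. -/
theorem off_succ (off : Nat) (ho : off + 1 < 2 ^ 32) :
    (BitVec.setWidth 32 (Word.ofBV (BitVec.ofNat 32 off) + 1).toBitVec).toNat = off + 1 := by
  have e1 : (1 : Word).toNat = 1 := rfl
  rw [BitVec.toNat_setWidth, UInt64.toNat_toBitVec, UInt64.toNat_add, toNat_ofBV32, e1, toNat_ofNat32 off (by omega)]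
  omega

/-- `add r14d, 1` with `r14 = k`: `k + 1`. -/
theorem k_succ (k : Nat) (hk : k + 1 < 2 ^ 32) :
    Word.ofBV (Word.part .w32 (UInt64.ofNat k) + 1#32) = UInt64.ofNat (k + 1) := by
  apply UInt64.toNat_inj.mp
  have e1 : (1#32).toNat = 1 := rfl
  rw [toNat_ofBV32, BitVec.toNat_add, part32_toNat, e1, UInt64.toNat_ofNat', UInt64.toNat_ofNat']
  omega

/-- **The loop head again after the `book < 0` arm** (0x110e31–0x110e56 + 0x110d06): the memory is the head's with five stores —
two return addresses of check calls at `[rsp − 8]`, `[rsp] = cval >> cbits`, `finalY[offset] = 0`, `[rsp + 8] = offset + 1` —,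
`r14 = k + 1`: `Loop4 … (k + 1)` by `Loop4.step`. Stated over the walker's `w_mem` with the stored values generalised, so that
`u_same` runs in a small context. -/
theorem back_close {u₀ : State} {others : List Obj} {frames : List (Nat × FrameLayout)} {len : Nat} {Ar : Arena}
    {stored room : Int} {mode : Nat} {ysz : Nat → Nat} {e : State} {ret : Word} {i j k : Nat} {v s : State}
    (hl : Loop4 u₀ others frames len Ar stored room mode ysz e ret i j k v)
    (he_room : 0x700000 + 3856 ≤ (e.reg .rsp).toNat) (he_top : (e.reg .rsp).toNat + 8 ≤ 0x800000)
    (hk : k < slot32 e v 0x10) {y off x1 x2 x3 : Nat}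
    (hy : stb_vorbis.finalY v.mem (fOf e) i = y)
    (hoff : 2 + Floor1.dimSum v.mem (slot64 e v 0x18) j + k = off)
    (w_mem : s.mem = ((((v.mem.writeLE (e.reg .rsp - 3008) 8 x1).writeLE (e.reg .rsp - 3000) 4 x2).writeLE
      (e.reg .rsp - 3008) 8 x3).writeLE (addr (y + 2 * off)) 2 0).writeLE (e.reg .rsp - 2992) 4
        (BitVec.setWidth 32 (Word.ofBV (BitVec.ofNat 32 off) + 1).toBitVec).toNat)
    (hrsp : s.reg .rsp = e.reg .rsp - 3000) (hcode : Mem.EqOn Vorbis.L.textLo Vorbis.L.textHi u₀.mem s.mem)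
    (habi : abiInv s) (hrbp : (s.reg .rbp).toNat = fOf e) (hr14 : s.reg .r14 = UInt64.ofNat (k + 1)) :
    Loop4 u₀ others frames len Ar stored room mode ysz e ret i j (k + 1) s := by
  have hinv := hl.inv
  have hok := hinv.ok
  have hi := hl.i_lt
  -- the floor record: `offset < values` (FL8), the block holds `2·values` bytes (FY1)
  obtain ⟨g, hg⟩ : ∃ g : Nat, slot64 e v 0x18 = g := ⟨_, rfl⟩
  have hgf : IsFloor v.mem (fOf e) g := by
    rw [← hg]
    exact hl.g
  have hfl := hinv.config.floor.floor hgf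
  have hjlt : j < Floor1.partitions v.mem g := by
    rw [← hg]
    exact hl.j_lt
  have hklt : k < Floor1.class_dimensions v.mem g (Floor1.partition_class_list v.mem g j) := by
    have h1 := hk
    rw [hl.slot_cdim, hl.slot_pclass, hg] at h1
    exact h1
  rw [hg] at hoff
  have hofflt := hfl.offset_lt hjlt hklt
  rw [hoff] at hofflt
  have hvb := hfl.values_bounds
  obtain ⟨hyb, hysz⟩ := hinv.fy i hi
  rw [hy] at hyb
  have hysz' : 2 * Floor1.values v.mem g ≤ (ysz i : Int) := by
    obtain ⟨ix, hix, rfl⟩ := hgf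
    exact hysz ix hix
  have hyins := hok.inside _ hyb
  simp only [vblock] at hyins
  have hfoff := hinv.objOff
  simp only [voff] at hfoff
  have hyobj := hinv.sep.bufobj _ (SampleBuf.finalY i hi (ysz i) (hy ▸ hyb))
  rw [hy] at hyobj
  simp only [vblock, voff] at hyobj
  have hyfit : 2 * off + 2 ≤ ysz i := by omega
  have hTy : (addr (y + 2 * off)).toNat = y + 2 * off := toNat_addr _ (by omega)
  have a8 : e.reg .rsp - 3000 + 0x8 = e.reg .rsp - 2992 := slot_a8 _
  have hoff' : slot32 e s 0x8 = 2 + Floor1.dimSum v.mem (slot64 e v 0x18) j + (k + 1) := by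
    rw [hg, ← Nat.add_assoc, hoff]
    show s.mem.readLE (e.reg .rsp - 3000 + 0x8) 4 = off + 1
    rw [a8, w_mem, Mem.readLE_writeLE_same _ _ _ _ (by omega), off_succ off (by omega)]
    omega
  clear hofflt hysz' hvb hysz hklt hjlt
  have hsame : Mem.SameExcept [⟨(e.reg .rsp).toNat - 3856, (e.reg .rsp).toNat - 3000 + 12⟩,
      ⟨fOf e + 48, fOf e + 56⟩, ⟨fOf e + 84, fOf e + 96⟩, ⟨fOf e + 136, fOf e + 144⟩, ⟨fOf e + 1484, fOf e + 1749⟩,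
      ⟨fOf e + 1752, fOf e + 1784⟩, ⟨y, y + ysz i⟩] v.mem s.mem := by
    clear hfoff hyobj
    u_same
  have hsame2 : Mem.SameExcept [⟨(e.reg .rsp).toNat - 3856, (e.reg .rsp).toNat - 3000 + 12⟩, ⟨y, y + ysz i⟩]
      v.mem s.mem := by
    clear hfoff hyobj
    u_same
  have hbits : Bits (RunBlk Ar len) len s.mem (fOf e) := by
    apply hinv.fb.vorbis.bits.frame_fields
    apply Bits.SameFields.of_sameExcept hsame2
    all_goals
      intro w hw
      simp only [List.mem_cons, List.mem_nil_iff, or_false] at hw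
      rcases hw with rfl | rfl <;> simp only [] <;> omega
  exact hl.step he_room he_top hrsp hcode habi hrbp hr14 hk (hy ▸ hsame) hoff' hbits

/-- **`Loop4` at the cut 0x110d5c** (the `book ≥ 0` arm, 0x110d17–0x110d56): the memory is the loop head's with two stores — the
return address of the check call at `[rsp − 8]` and `[rsp] = cval >> cbits` —, no register of the assertion was written:
`Loop4.step'` with the same `k`; `codebook_count` and the loop bound `[rsp + 0x10]` read the same. -/
theorem front_close {u₀ : State} {others : List Obj} {frames : List (Nat × FrameLayout)} {len : Nat} {Ar : Arena}
    {stored room : Int} {mode : Nat} {ysz : Nat → Nat} {e : State} {ret : Word} {i j k : Nat} {v s : State}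
    (hl : Loop4 u₀ others frames len Ar stored room mode ysz e ret i j k v)
    (he_room : 0x700000 + 3856 ≤ (e.reg .rsp).toNat) (he_top : (e.reg .rsp).toNat + 8 ≤ 0x800000)
    {x1 x2 : Nat}
    (w_mem : s.mem = (v.mem.writeLE (e.reg .rsp - 3008) 8 x1).writeLE (e.reg .rsp - 3000) 4 x2)
    (hrsp : s.reg .rsp = e.reg .rsp - 3000) (hcode : Mem.EqOn Vorbis.L.textLo Vorbis.L.textHi u₀.mem s.mem)
    (habi : abiInv s) (hrbp : s.reg .rbp = v.reg .rbp) (hr14 : s.reg .r14 = v.reg .r14) :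
    Loop4 u₀ others frames len Ar stored room mode ysz e ret i j k s ∧
      stb_vorbis.codebook_count s.mem (fOf e) = stb_vorbis.codebook_count v.mem (fOf e) ∧
      slot32 e s 0x10 = slot32 e v 0x10 := by
  have hinv := hl.inv
  have hfoff := hinv.objOff
  simp only [voff] at hfoff
  have a8 : e.reg .rsp - 3000 + 0x8 = e.reg .rsp - 2992 := slot_a8 _
  have hoffs : v.mem.readLE (e.reg .rsp - 2992) 4 = 2 + Floor1.dimSum v.mem (slot64 e v 0x18) j + k := by
    rw [← a8]
    exact hl.slot_offset
  have hoff' : slot32 e s 0x8 = 2 + Floor1.dimSum v.mem (slot64 e v 0x18) j + k := by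
    show s.mem.readLE (e.reg .rsp - 3000 + 0x8) 4 = _
    rw [a8]
    u_frame hoffs
  have hsame : Mem.SameExcept [⟨(e.reg .rsp).toNat - 3856, (e.reg .rsp).toNat - 3000 + 12⟩,
      ⟨fOf e + 48, fOf e + 56⟩, ⟨fOf e + 84, fOf e + 96⟩, ⟨fOf e + 136, fOf e + 144⟩, ⟨fOf e + 1484, fOf e + 1749⟩,
      ⟨fOf e + 1752, fOf e + 1784⟩,
      ⟨stb_vorbis.finalY v.mem (fOf e) i, stb_vorbis.finalY v.mem (fOf e) i + ysz i⟩] v.mem s.mem := by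
    clear hfoff
    u_same
  have hsame1 : Mem.SameExcept [⟨(e.reg .rsp).toNat - 3856, (e.reg .rsp).toNat - 3000 + 12⟩] v.mem s.mem := by
    clear hfoff
    u_same
  have hbits : Bits (RunBlk Ar len) len s.mem (fOf e) :=
    Reader.bits_of_window hinv.fb.vorbis.bits hsame1 (by omega)
  have hrbp' : (s.reg .rbp).toNat = fOf e := by
    rw [hrbp]
    exact hl.rbp
  have hr14' : s.reg .r14 = UInt64.ofNat k := by
    rw [hr14]
    exact hl.r14
  obtain ⟨hl4, _, ecc, ecd⟩ := hl.step' he_room he_top hrsp hcode habi hrbp' hr14' hl.k_le hsame hoff' hbits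
  exact ⟨hl4, ecc, ecd⟩

/-- **The body of sub-segment A** (0x110d0a–0x110d56 + 0x110e31–0x110e56 + 0x110d06, `k < cdim`): the loop test falls through;
`book = g->subclass_books[pclass][cval & csub]` (check 0x110d3a: FL5, FL6), `cval >>= cbits`; `book < 0` → `finalY[offset++] = 0`
(check 0x110e46: FL8, FY1), `++k` → the loop head `At4K … (k + 1)` (`back_close`); otherwise → the cut 0x110d5c, `At4b` with
`b` = the loaded `uint16` (`front_close`, FL6 for `book_lt`). ONE walk; the `jge` arm is refuted by `k < cdim`. -/
theorem segA_body {Lay : Layout} (hLay : Lay.hi = 0x1000000) {μ : Microarch} (hμ : UserX.MicroOK μ) {u₀ : State}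
    (hcode : HasCodeNat Lay u₀ Vorbis.L.vorbis_decode_packet_rest.entry Vorbis.Code.code_vorbis_decode_packet_rest.nat Vorbis.L.vorbis_decode_packet_rest.size)
    (hs2 : Asan.SmallCheck Lay μ Vorbis.WayInv (Vorbis.CodeOK u₀) [.rax, .rcx, .rdx] 2 Vorbis.L.__asan_store2_noabort.entry)
    (hl2 : Asan.SmallCheck Lay μ Vorbis.WayInv (Vorbis.CodeOK u₀) [.rax, .rcx, .rdx] 2 Vorbis.L.__asan_load2_noabort.entry)
    (others : List Obj) (frames : List (Nat × FrameLayout)) (len : Nat) (Ar : Arena) (stored room : Int)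
    (mode : Nat) (ysz : Nat → Nat) (e : State) (ret : Word) (i j k : Nat) (v : State)
    (hat : At4K u₀ others frames len Ar stored room mode ysz e ret i j k v)
    (hk : k < slot32 e v 0x10) :
    ReachVia Lay μ Vorbis.WayInv v (fun w => At4K u₀ others frames len Ar stored room mode ysz e ret i j (k + 1) w ∨ ∃ b, At4b u₀ others frames len Ar stored room mode ysz e ret i j k b w) := by
  have he := hat.entry
  v_entry he
  have w_rip := hat.rip
  have w_rsp : v.reg .rsp = e.reg .rsp - 3000 := hat.rsp
  have hrsp_v : v.reg .rsp = e.reg .rsp - 3000 := hat.rsp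
  have w_eq : Mem.EqOn Vorbis.L.textLo Vorbis.L.textHi u₀.mem v.mem := hat.code
  clear he_eq
  have hdf : v.flags .df = false := (show abiInv _ from hat.abi).1
  have hmx : v.mxcsr &&& 0x1F80 = 0x1F80 := (show abiInv _ from hat.abi).2
  have hsse := Vorbis.sseOK_of_abiInv hat.abi
  have hr14 : v.reg .r14 = UInt64.ofNat k := hat.r14
  have hcd8 := hat.toLoop4.cdim_le
  obtain ⟨hsh, hinv0, hargs⟩ := hat.pre
  have hinv := hat.inv
  have hok := hinv.ok
  have hL := hinv.live
  have hi := hat.i_lt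
  have hshadow := hat.shadow
  have a8 : e.reg .rsp - 3000 + 0x8 = e.reg .rsp - 2992 := slot_a8 _
  have a10 : e.reg .rsp - 3000 + 0x10 = e.reg .rsp - 2984 := slot_a10 _
  have a18 : e.reg .rsp - 3000 + 0x18 = e.reg .rsp - 2976 := slot_a18 _
  have a20 : e.reg .rsp - 3000 + 0x20 = e.reg .rsp - 2968 := slot_a20 _
  have a30 : e.reg .rsp - 3000 + 0x30 = e.reg .rsp - 2952 := slot_a30 _
  have a38 : e.reg .rsp - 3000 + 0x38 = e.reg .rsp - 2944 := slot_a38 _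
  -- the loop bound
  obtain ⟨cd, hcd⟩ : ∃ cd : Nat, slot32 e v 0x10 = cd := ⟨_, rfl⟩
  have hcdim : v.mem.readLE (e.reg .rsp - 2984) 4 = cd := by
    rw [← a10]
    exact hcd
  -- the floor record
  obtain ⟨g, hg⟩ : ∃ g : Nat, slot64 e v 0x18 = g := ⟨_, rfl⟩
  have hgs : v.mem.readLE (e.reg .rsp - 2976) 8 = g := by
    rw [← a18]
    exact hg
  have hgf : IsFloor v.mem (fOf e) g := by
    rw [← hg]
    exact hat.g
  have hfls := hinv.config.floor
  have hfl := hfls.floor hgf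
  have hgin := hfls.toFloorShape.elem_inside hgf hok
  have hgoff : g + 1596 ≤ 0x700000 ∨ 0x800000 ≤ g := by
    have h1 := hinv.offStack _ hfls.toFloorShape.FL2
    have h2 := hfls.toFloorShape.elem_in hgf (off := 0) (n := Off.sizeof.Floor) (Nat.le_refl _)
    simp only [vblock, voff, Nat.add_zero] at h1 h2
    simp only [voff] at hgin
    omega
  simp only [voff] at hgin
  have hjlt : j < Floor1.partitions v.mem g := by
    rw [← hg]
    exact hat.j_lt
  -- the class, the mask, the index
  obtain ⟨pc, hpc⟩ : ∃ pc : Nat, Floor1.partition_class_list v.mem g j = pc := ⟨_, rfl⟩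
  have hpcs : v.mem.readLE (e.reg .rsp - 2944) 4 = pc := by
    rw [← a38, ← hpc, ← hg]
    exact hat.slot_pclass
  have hpc16 : pc < 16 := by
    have h5 := hfl.FL5 j hjlt
    rw [hpc] at h5
    omega
  obtain ⟨cb, hcb⟩ : ∃ cb : Nat, Floor1.class_subclasses v.mem g pc = cb := ⟨_, rfl⟩
  have hcb3 : cb ≤ 3 := by
    have h6 := (hfl.FL6 j hjlt).sub
    rw [hpc, hcb] at h6
    exact h6
  have hcss : v.mem.readLE (e.reg .rsp - 2952) 4 = 2 ^ cb - 1 := by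
    have h1 := hat.slot_csub
    rw [hat.slot_cbits, hat.slot_pclass, hg, hpc, hcb] at h1
    rw [← a30]
    exact h1
  obtain ⟨cv, hcv⟩ : ∃ cv : Nat, v.mem.readLE (e.reg .rsp - 3000) 4 = cv := ⟨_, rfl⟩
  have hcv32 : cv < 2 ^ 32 := by
    rw [← hcv]
    exact Mem.readLE_lt' _ _ 4
  have hpow8 : 2 ^ cb ≤ 8 := two_pow_le_8 cb hcb3
  have hpow1 : 1 ≤ 2 ^ cb := Nat.two_pow_pos cb
  obtain ⟨idx, hidx⟩ : ∃ idx : Nat, (cv % 2 ^ 32) &&& ((2 ^ cb - 1) % 2 ^ 32) = idx := ⟨_, rfl⟩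
  have hidx' : cv &&& (2 ^ cb - 1) = idx := by
    rw [← hidx, Nat.mod_eq_of_lt hcv32, Nat.mod_eq_of_lt (by omega)]
  have hidx8 : idx < 8 := by
    have h1 := mask_lt cv cb
    omega
  have hsbw := sb_addr_w g cv (2 ^ cb - 1) pc (by rw [hidx]; exact hidx8) hpc16 (by omega)
  rw [hidx] at hsbw
  have hTsb : (addr (g + 82 + 2 * (8 * pc + idx))).toNat = g + 82 + 2 * (8 * pc + idx) := toNat_addr _ (by omega)
  obtain ⟨b, hb⟩ : ∃ b : Nat, v.mem.readLE (addr (g + 82 + 2 * (8 * pc + idx))) 2 = b := ⟨_, rfl⟩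
  have hb16 : b < 65536 := by
    rw [← hb]
    exact Mem.readLE_lt' _ _ 2
  -- the offset, the finalY block
  obtain ⟨off, hoff⟩ : ∃ off : Nat, 2 + Floor1.dimSum v.mem g j + k = off := ⟨_, rfl⟩
  have hoffs : v.mem.readLE (e.reg .rsp - 2992) 4 = off := by
    rw [← a8, ← hoff, ← hg]
    exact hat.slot_offset
  obtain ⟨y, hy⟩ : ∃ y : Nat, stb_vorbis.finalY v.mem (fOf e) i = y := ⟨_, rfl⟩
  have hys : v.mem.readLE (e.reg .rsp - 2968) 8 = y := by
    rw [← a20, ← hy]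
    exact hat.slot_finalY
  have hklt : k < Floor1.class_dimensions v.mem g (Floor1.partition_class_list v.mem g j) := by
    have h1 := hk
    rw [hat.slot_cdim, hat.slot_pclass, hg] at h1
    exact h1
  have hofflt := hfl.offset_lt hjlt hklt
  rw [hoff] at hofflt
  have hvb := hfl.values_bounds
  obtain ⟨hyb, hysz⟩ := hinv.fy i hi
  rw [hy] at hyb
  have hysz' : 2 * Floor1.values v.mem g ≤ (ysz i : Int) := by
    obtain ⟨ix, hix, rfl⟩ := hgf
    exact hysz ix hix
  have hyins := hok.inside _ hyb
  have hyoff := hinv.offStack _ hyb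
  simp only [vblock] at hyins
  simp only [] at hyoff
  have hywhere := (LiveBytes.of_block (a := y) (n := ysz i) (hL _ hyb) (Nat.le_refl _) (Nat.le_refl _)).where_
    hat.shadow hsh.offText (by omega) (by u_omega)
  have hyw := y_addr_w y off (by omega) (by omega)
  have hTy : (addr (y + 2 * off)).toNat = y + 2 * off := toNat_addr _ (by omega)
  have hfoff := hinv.objOff
  simp only [voff] at hfoff
  have hyobj := hinv.sep.bufobj _ (SampleBuf.finalY i hi (ysz i) (hy ▸ hyb))
  rw [hy] at hyobj
  simp only [vblock, voff] at hyobj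
  u_walk hcode [hμ.vendor, hsbw, hyw] until [Vorbis.L.vorbis_decode_packet_rest.cut8, Vorbis.L.vorbis_decode_packet_rest.cut7, Vorbis.L.vorbis_decode_packet_rest.at_110d5c] span [Vorbis.L.textLo, Vorbis.L.textHi] side (v_side)
  case check_110d3a =>
    -- 0x110d3a: load2 `g->subclass_books[pclass][cval & csub]` (FL5, FL6)
    have hun : ShadowUntouched v.mem s_110d3a.mem := by v_untouched
    have hs := hfls.toFloorShape.site_subclass_books hL hgf (c := pc) (k := idx) (a := g + 82 + 2 * (8 * pc + idx))
      (by simp only [voff]; omega) (by simp only [voff]; omega) (by simp only [voff])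
    exact check_site hshadow hun hs hTsb
  case check_110e46 =>
    -- 0x110e46: store2 `finalY + 2·offset` (FL8, FY1)
    have hun : ShadowUntouched v.mem s_110e46.mem := by v_untouched
    have hs : Site (LiveSet others (framesIn frames e)) (y + 2 * off) 2 :=
      Site.of_blk hL hyb (by simp only []; omega) (by simp only []; omega) (by omega)
    exact check_site hshadow hun hs hTy
  · -- `k ≥ cdim` contradicts `k < cdim`
    exfalso
    rw [hcd] at hk
    rw [part32_ofNat k (by omega), ofNat32_toInt_small k (by omega), ofNat32_toInt_small cd (by omega)] at hbr_110d11
    omega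
  · -- `book < 0` (0x110e31–0x110e56 + 0x110d06): the back edge, the loop head with `k + 1`
    refine ReachVia.done (Or.inl ?_)
    have habi : abiInv s_110d06 := by
      show (Vorbis.conv u₀).inv _
      v_inv
    have hrbp : (s_110d06.reg .rbp).toNat = fOf e := by
      rw [w_kept.get .rbp rfl]
      exact hat.rbp
    have hr14' : s_110d06.reg .r14 = UInt64.ofNat (k + 1) := by
      rw [w_r14]
      exact k_succ k (by omega)
    have hoffg : 2 + Floor1.dimSum v.mem (slot64 e v 0x18) j + k = off := by
      rw [hg]
      exact hoff
    exact ⟨back_close hat.toLoop4 he_room he_top hk hy hoffg w_mem w_rsp w_eq habi hrbp hr14', w_rip⟩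
  · -- `book ≥ 0` (0x110d56 not taken): the cut 0x110d5c
    refine ReachVia.done (Or.inr ⟨b, ?_⟩)
    have habi : abiInv s_110d56 := by
      show (Vorbis.conv u₀).inv _
      v_inv
    obtain ⟨hl4, ecc, ecd⟩ := front_close hat.toLoop4 he_room he_top w_mem w_rsp w_eq habi (w_kept.get .rbp rfl)
      (w_kept.get .r14 rfl)
    have hb15 : b < 32768 := by
      have h1 := bit15_clear (BitVec.ofNat 16 b) hbr_110d56
      rw [BitVec.toNat_ofNat] at h1
      omega
    refine ⟨hl4, w_rip, ?_, ?_, hb15, ?_⟩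
    · rw [ecd]
      exact hk
    · rw [w_rbx]
      exact zext16_reg b hb16
    · -- FL6: the book is `−1` or a codebook of `f`; bit 15 is clear
      rw [ecc]
      have hr := hfl.book_range hjlt cv
      rw [hpc, hcb, hidx'] at hr
      have e1 : Floor1.subclass_books v.mem g pc idx = v.mem.i16 (g + 82 + 2 * (8 * pc + idx)) := by
        simp only [vacc, voff]
      have e2 : v.mem.u16 (g + 82 + 2 * (8 * pc + idx)) = b := hb
      have h3 := v.mem.i16_cases (g + 82 + 2 * (8 * pc + idx))
      rw [e1] at hr
      omega

end Vorbis.Spec.vorbis_decode_packet_rest_4a
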